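-- pv_equiv track=rewrite | github.com/paguso/if767_2021_2 | src/lz77.py | max_prefix_match
-- ===== SOURCE A (Python) =====
-- def max_prefix_match(txt, pat):
--     m = len(pat)-1
--     n = len(txt)
--
--     fsm = [128*[0]]
--     fsm[0][ord(pat[0])] = 1
--     brd = 0
--     for c in range(1,m):
--         fsm.append(fsm[brd][:])
--         fsm[c][ord(pat[c])] = c+1
--         brd = fsm[brd][ord(pat[c])]
--
--     l = 0
--     p = 0
--     cur = 0
--     i = 0
--     while i < n and l < m:
--         cur = fsm[cur][ord(txt[i])]
--         if cur > l:
--             l = cur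
--             p = i - l + 1
--         i += 1
--     return p, l
-- ===== SOURCE B (Python) =====
-- def _step(q, fail, j, c):
--     # KMP transition: next match length after state j reads character c
--     while j > 0 and q[j] != c:
--         j = fail[j - 1]
--     if q[j] == c:
--         j += 1
--     return j
--
--
-- def max_prefix_match(txt, pat):
--     q = pat[:-1]
--     m = len(q)
--     n = len(txt)
--
--     fail = [0] * m
--     for i in range(1, m):
--         fail[i] = _step(q, fail, fail[i - 1], q[i])
--
--     l = 0
--     p = 0
--     j = 0
--     i = 0
--     while i < n and l < m:
--         j = _step(q, fail, j, txt[i])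
--         if j > l:
--             l = j
--             p = i - l + 1
--         i += 1
--     return p, l
-- ===== Notes on version B (the rewrite author's own statement) =====
-- stated objective: faster
-- what changed: B replaces A's explicit 128-column DFA transition table (a copied 128-entry row per pattern state) by the classic KMP failure/border array with an amortized descent step, used both to build the table and to scan the text.
import Mathlib
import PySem

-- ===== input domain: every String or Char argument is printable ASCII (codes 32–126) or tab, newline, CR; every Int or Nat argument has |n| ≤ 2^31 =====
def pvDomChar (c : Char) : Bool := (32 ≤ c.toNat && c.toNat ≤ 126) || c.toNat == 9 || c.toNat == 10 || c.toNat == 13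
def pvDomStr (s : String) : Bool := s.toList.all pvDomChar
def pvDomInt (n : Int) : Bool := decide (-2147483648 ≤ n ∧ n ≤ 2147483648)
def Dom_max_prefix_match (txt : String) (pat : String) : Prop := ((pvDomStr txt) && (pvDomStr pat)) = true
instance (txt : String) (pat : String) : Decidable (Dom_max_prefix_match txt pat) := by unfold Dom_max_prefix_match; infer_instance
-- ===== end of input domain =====

-- B replaces A's 128-column DFA transition table by the KMP failure (border) function:
-- O(m + n) work and O(m) memory instead of O(128*m + n) table construction; same return value.

-- ===== PORT A =====
-- row 0 of A's table: 128 zeros, with entry ord(pat[0]) set to 1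
def pvRow0 (pl : List Char) : List Nat :=
  (List.replicate 128 0).set (pl.getD 0 ' ').toNat 1

-- one iteration of A's table-building loop: append a copy of row brd with entry ord(pat[c]) := c+1,
-- then brd := fsm[brd][ord(pat[c])]
def pvStepA (pl : List Char) (st : List (List Nat) × Nat) (c : Nat) : List (List Nat) × Nat :=
  ((st.1 ++ [(st.1.getD st.2 []).set (pl.getD c ' ').toNat (c + 1)]),
    (st.1.getD st.2 []).getD (pl.getD c ' ').toNat 0)

-- A's scanning while-loop (i < n and l < m), recursion over the remaining text
def pvScanA (fsm : List (List Nat)) (m : Nat) : List Char → Nat → Nat → Nat → Nat → Nat × Nat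
  | [], _i, l, p, _cur => (p, l)
  | a :: rest, i, l, p, cur =>
    if l < m then
      let cur' := (fsm.getD cur []).getD a.toNat 0
      if l < cur' then pvScanA fsm m rest (i + 1) cur' (i + 1 - cur') cur'
      else pvScanA fsm m rest (i + 1) l p cur'
    else (p, l)

def max_prefix_match (txt : String) (pat : String) : Int × Int :=
  let pl := pat.toList
  let m := pl.length - 1
  let st := (List.range' 1 (m - 1)).foldl (pvStepA pl) ([pvRow0 pl], 0)
  let r := pvScanA st.1 m txt.toList 0 0 0 0
  ((r.1 : Int), (r.2 : Int))

-- ===== PORT B =====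
-- the while-loop of B's _step: while j > 0 and q[j] != c: j = fail[j-1]   (fuel = j bounds the iterations)
def pvDescend (q : List Char) (fl : List Nat) (c : Char) : Nat → Nat → Nat
  | 0, j => j
  | fuel + 1, j =>
    if 0 < j ∧ q.getD j ' ' ≠ c then pvDescend q fl c fuel (fl.getD (j - 1) 0) else j

-- B's _step helper: descend along the failure links, then extend on a match
def pvStep (q : List Char) (fl : List Nat) (j : Nat) (c : Char) : Nat :=
  let j' := pvDescend q fl c j j
  if q.getD j' ' ' = c then j' + 1 else j'

-- one iteration of B's failure-table loop: fail[i] = _step(q, fail, fail[i-1], q[i])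
def pvBuildStep (q : List Char) (fl : List Nat) (i : Nat) : List Nat :=
  fl.set i (pvStep q fl (fl.getD (i - 1) 0) (q.getD i ' '))

-- B's scanning while-loop
def pvScanB (q : List Char) (fl : List Nat) (m : Nat) : List Char → Nat → Nat → Nat → Nat → Nat × Nat
  | [], _i, l, p, _j => (p, l)
  | a :: rest, i, l, p, j =>
    if l < m then
      let j' := pvStep q fl j a
      if l < j' then pvScanB q fl m rest (i + 1) j' (i + 1 - j') j'
      else pvScanB q fl m rest (i + 1) l p j'
    else (p, l)

def max_prefix_match_alt (txt : String) (pat : String) : Int × Int :=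
  let q := pat.toList.dropLast
  let m := q.length
  let fl := (List.range' 1 (m - 1)).foldl (pvBuildStep q) (List.replicate m 0)
  let r := pvScanB q fl m txt.toList 0 0 0 0
  ((r.1 : Int), (r.2 : Int))

-- ===== PRECONDITION & SPEC =====
-- Pre_ excludes only pat = "", on which A raises IndexError at pat[0] (B would return (0, 0) there).
def Pre_max_prefix_match (txt : String) (pat : String) : Prop := pat ≠ ""
instance (txt : String) (pat : String) : Decidable (Pre_max_prefix_match txt pat) := by
  unfold Pre_max_prefix_match; infer_instance

def pvWitness_max_prefix_match : String × String := ("abaabab", "aba")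

def Spec_max_prefix_match (txt : String) (pat : String) (out : Int × Int) : Prop := out = max_prefix_match_alt txt pat
instance (txt : String) (pat : String) (out : Int × Int) : Decidable (Spec_max_prefix_match txt pat out) := by unfold Spec_max_prefix_match; infer_instance

-- ===== CLAIM (what is proved, stated in full; the proofs are below) =====
def Claim_equal_max_prefix_match : Prop := ∀ (txt : String) (pat : String), Dom_max_prefix_match txt pat → Pre_max_prefix_match txt pat → Spec_max_prefix_match txt pat (max_prefix_match txt pat)


-- ===== LEMMAS AND PROOFS =====

-- pvS q w = length of the longest prefix of q that is a suffix of w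
def pvS (q w : List Char) : Nat := Nat.findGreatest (fun k => q.take k <:+ w) q.length

lemma pvS_le (q w : List Char) : pvS q w ≤ q.length := Nat.findGreatest_le _

lemma pvS_suffix (q w : List Char) : q.take (pvS q w) <:+ w :=
  Nat.findGreatest_spec (P := fun k => q.take k <:+ w) (Nat.zero_le _) (by simp)

lemma le_pvS {q w : List Char} {k : Nat} (hk : k ≤ q.length) (h : q.take k <:+ w) :
    k ≤ pvS q w := Nat.le_findGreatest hk h

lemma pvS_le_len (q w : List Char) : pvS q w ≤ w.length := by
  have h := (pvS_suffix q w).length_le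
  rw [List.length_take, Nat.min_eq_left (pvS_le q w)] at h
  exact h

lemma suffix_of_suffix_le {u v w : List Char} (hu : u <:+ w) (hv : v <:+ w)
    (h : u.length ≤ v.length) : u <:+ v := by
  obtain ⟨t, rfl⟩ := hv
  have hvw : v.length ≤ (t ++ v).length := by rw [List.length_append]; omega
  have hu' := List.suffix_iff_eq_drop.mp hu
  rw [List.length_append] at hu'
  have he : t.length + v.length - u.length = t.length + (v.length - u.length) := by omega
  rw [he, List.drop_append] at hu'
  have ht0 : t.drop (t.length + (v.length - u.length)) = [] := by
    apply List.drop_eq_nil_of_le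
    omega
  have hidx : t.length + (v.length - u.length) - t.length = v.length - u.length := by omega
  rw [ht0, hidx, List.nil_append] at hu'
  rw [hu']
  exact List.drop_suffix _ _

lemma suffix_append_same {u v t : List Char} (h : u <:+ v) : u ++ t <:+ v ++ t := by
  obtain ⟨s, rfl⟩ := h
  exact ⟨s, (List.append_assoc ..).symm⟩

lemma concat_suffix_concat {u w : List Char} {x a : Char} :
    u ++ [x] <:+ w ++ [a] ↔ x = a ∧ u <:+ w := by
  rw [← List.reverse_prefix]
  simp only [List.reverse_append, List.reverse_singleton, List.singleton_append]
  rw [List.cons_prefix_cons, List.reverse_prefix]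

lemma take_concat_getD {q : List Char} {k : Nat} (h : k < q.length) :
    q.take (k + 1) = q.take k ++ [q.getD k ' '] := by
  rw [List.take_add_one, List.getElem?_eq_getElem h, List.getD_eq_getElem _ _ h]
  rfl

lemma peel {q w : List Char} {a : Char} {k : Nat} (hk0 : 0 < k) (hk : k ≤ q.length) :
    (q.take k <:+ w ++ [a]) ↔ (q.getD (k - 1) ' ' = a ∧ q.take (k - 1) <:+ w) := by
  obtain ⟨k, rfl⟩ : ∃ k', k = k' + 1 := ⟨k - 1, by omega⟩
  rw [take_concat_getD (by omega), concat_suffix_concat]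
  simp

lemma pvS_take {q : List Char} {k : Nat} (hk : k ≤ q.length) : pvS q (q.take k) = k := by
  refine le_antisymm ?_ (le_pvS hk (List.suffix_refl _))
  have h := pvS_le_len q (q.take k)
  rw [List.length_take] at h
  omega

lemma pvS_nil (q : List Char) : pvS q [] = 0 :=
  Nat.le_zero.mp (pvS_le_len q [])

lemma pvS_single {q : List Char} (hq : 0 < q.length) (a : Char) :
    pvS q [a] = if q.getD 0 ' ' = a then 1 else 0 := by
  have hle : pvS q [a] ≤ 1 := pvS_le_len q [a]
  have ht : q.take 1 = [q.getD 0 ' '] := by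
    have h := take_concat_getD (q := q) (k := 0) hq
    simpa using h
  split_ifs with h
  · refine le_antisymm hle (le_pvS hq ?_)
    rw [ht, h]
  · rcases Nat.le_one_iff_eq_zero_or_eq_one.mp hle with h0 | h1
    · exact h0
    · exfalso
      have hs := pvS_suffix q [a]
      rw [h1, ht] at hs
      have heq : [q.getD 0 ' '] = [a] := hs.eq_of_length (by simp)
      exact h (List.singleton_inj.mp heq)

lemma suffix_drop_one {u w : List Char} (hu : u <:+ w) (h : u.length + 1 ≤ w.length) :
    u <:+ w.drop 1 :=
  suffix_of_suffix_le hu (List.drop_suffix 1 w) (by rw [List.length_drop]; omega)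

lemma pvS_ext {q w : List Char} {a : Char} (h : pvS q w < q.length) :
    pvS q (w ++ [a]) = pvS q (q.take (pvS q w) ++ [a]) := by
  apply le_antisymm
  · rcases Nat.eq_zero_or_pos (pvS q (w ++ [a])) with h0 | hpos
    · omega
    · have hkle : pvS q (w ++ [a]) ≤ q.length := pvS_le q _
      have hsuf := pvS_suffix q (w ++ [a])
      rw [peel hpos hkle] at hsuf
      obtain ⟨ha, hsf⟩ := hsuf
      have h2 : q.take (pvS q (w ++ [a]) - 1) <:+ q.take (pvS q w) :=
        suffix_of_suffix_le hsf (pvS_suffix q w)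
          (by
            rw [List.length_take, List.length_take]
            have := le_pvS (q := q) (w := w) (k := pvS q (w ++ [a]) - 1) (by omega) hsf
            omega)
      apply le_pvS hkle
      rw [peel hpos hkle]
      exact ⟨ha, h2⟩
  · rcases Nat.eq_zero_or_pos (pvS q (q.take (pvS q w) ++ [a])) with h0 | hpos
    · omega
    · have hkle : pvS q (q.take (pvS q w) ++ [a]) ≤ q.length := pvS_le q _
      have hsuf := pvS_suffix q (q.take (pvS q w) ++ [a])
      rw [peel hpos hkle] at hsuf
      obtain ⟨ha, hsf⟩ := hsuf
      apply le_pvS hkle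
      rw [peel hpos hkle]
      exact ⟨ha, hsf.trans (pvS_suffix q w)⟩

lemma pvS_neq {q : List Char} {a : Char} {c : Nat} (_hc0 : 0 < c) (hc : c < q.length)
    (ha : q.getD c ' ' ≠ a) :
    pvS q (q.take c ++ [a]) = pvS q ((q.take c).drop 1 ++ [a]) := by
  apply le_antisymm
  · rcases Nat.eq_zero_or_pos (pvS q (q.take c ++ [a])) with h0 | hpos
    · omega
    · have hkle : pvS q (q.take c ++ [a]) ≤ q.length := pvS_le q _
      have hsuf := pvS_suffix q (q.take c ++ [a])
      rw [peel hpos hkle] at hsuf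
      obtain ⟨hA, hsf⟩ := hsuf
      have hlen : pvS q (q.take c ++ [a]) - 1 ≤ c := by
        have h1 := hsf.length_le
        rw [List.length_take, List.length_take] at h1
        omega
      have hne : pvS q (q.take c ++ [a]) - 1 ≠ c := fun he => ha (he ▸ hA)
      have h2 : q.take (pvS q (q.take c ++ [a]) - 1) <:+ (q.take c).drop 1 :=
        suffix_drop_one hsf (by rw [List.length_take, List.length_take]; omega)
      apply le_pvS hkle
      rw [peel hpos hkle]
      exact ⟨hA, h2⟩
  · apply le_pvS (pvS_le q _)
    exact (pvS_suffix q _).trans (suffix_append_same (List.drop_suffix 1 (q.take c)))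

lemma getD_dropLast {pl : List Char} {c : Nat} (h : c < pl.length - 1) :
    pl.dropLast.getD c ' ' = pl.getD c ' ' := by
  have hlen : c < pl.dropLast.length := by rw [List.length_dropLast]; omega
  rw [List.getD_eq_getElem _ _ hlen, List.getD_eq_getElem _ _ (by omega)]
  exact List.getElem_dropLast ..

lemma char_eq_of_toNat {a b : Char} (h : a.toNat = b.toNat) : a = b :=
  Char.ext (UInt32.toNat_inj.mp h)

lemma getD_replicate0 (n k : Nat) : (List.replicate n (0 : Nat)).getD k 0 = 0 := by
  rcases Nat.lt_or_ge k n with h | h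
  · rw [List.getD_eq_getElem _ _ (by simpa using h)]
    exact List.getElem_replicate ..
  · rw [List.getD_eq_default _ _ (by simpa using h)]

lemma getD_set_self {A : Type} (l : List A) (i : Nat) (v d : A) (h : i < l.length) :
    (l.set i v).getD i d = v := by
  simp [List.getD_eq_getElem?_getD, h]

lemma getD_set_ne {A : Type} (l : List A) (i j : Nat) (v d : A) (h : i ≠ j) :
    (l.set i v).getD j d = l.getD j d := by
  simp [List.getD_eq_getElem?_getD, List.getElem?_set_ne h]

lemma getD_concat_len {A : Type} (u : List A) (x d : A) (i : Nat) (h : i = u.length) :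
    (u ++ [x]).getD i d = x := by
  subst h
  simp [List.getD_eq_getElem?_getD]

lemma range'_one_concat (n : Nat) : List.range' 1 (n + 1) = List.range' 1 n ++ [n + 1] := by
  have h : 1 + 1 * n = n + 1 := by ring
  rw [List.range'_concat, h]

lemma take_one_drop_one_nil (q : List Char) : (q.take 1).drop 1 = [] := by
  apply List.length_eq_zero_iff.mp
  simp

lemma ascii_of_dom {s : String} (h : pvDomStr s = true) : ∀ ch ∈ s.toList, ch.toNat < 128 := by
  intro ch hm
  have h' := (List.all_eq_true.mp h) ch hm
  unfold pvDomChar at h'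
  simp at h'
  omega

-- ===== A-side invariant: the table rows compute pvS transitions, brd is the border length =====
lemma buildA_inv (pl q : List Char) (m : Nat) (hq : q = pl.dropLast) (hm : m = q.length)
    (hm1 : 1 ≤ m) (hascii : ∀ ch ∈ pl, ch.toNat < 128) :
    ∀ n, n ≤ m - 1 →
      (((List.range' 1 n).foldl (pvStepA pl) ([pvRow0 pl], 0)).1.length = n + 1) ∧
      (∀ t, t ≤ n → (((List.range' 1 n).foldl (pvStepA pl) ([pvRow0 pl], 0)).1.getD t []).length = 128) ∧
      (∀ t, t ≤ n → ∀ a : Char, a.toNat < 128 →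
        (((List.range' 1 n).foldl (pvStepA pl) ([pvRow0 pl], 0)).1.getD t []).getD a.toNat 0
          = pvS q (q.take t ++ [a])) ∧
      (((List.range' 1 n).foldl (pvStepA pl) ([pvRow0 pl], 0)).2 = pvS q ((q.take (n + 1)).drop 1)) := by
  have hql : q.length = pl.length - 1 := by rw [hq, List.length_dropLast]
  have hq0 : 0 < q.length := by omega
  have hpl0 : 0 < pl.length := by omega
  intro n
  induction n with
  | zero =>
    intro _
    refine ⟨by simp, ?_, ?_, ?_⟩
    · intro t ht
      interval_cases t
      simp [pvRow0]
    · intro t ht a ha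
      interval_cases t
      have hrhs : pvS q (q.take 0 ++ [a]) = if q.getD 0 ' ' = a then 1 else 0 := by
        rw [List.take_zero, List.nil_append, pvS_single hq0 a]
      have hq00 : q.getD 0 ' ' = pl.getD 0 ' ' := by rw [hq]; exact getD_dropLast (by omega)
      by_cases hia : a.toNat = (pl.getD 0 ' ').toNat
      · have ha' : a = pl.getD 0 ' ' := char_eq_of_toNat hia
        have hmem : (pl.getD 0 ' ').toNat < 128 :=
          hascii _ (by rw [List.getD_eq_getElem _ _ hpl0]; exact List.getElem_mem _)
        have hlt : (pl.getD 0 ' ').toNat < (List.replicate 128 (0 : Nat)).length := by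
          rw [List.length_replicate]
          exact hmem
        have hcond : q.getD 0 ' ' = a := by rw [hq00]; exact ha'.symm
        show (pvRow0 pl).getD a.toNat 0 = pvS q (q.take 0 ++ [a])
        unfold pvRow0
        rw [hia, getD_set_self _ _ _ _ hlt, hrhs, if_pos hcond]
      · have hne : q.getD 0 ' ' ≠ a := fun he => hia (by rw [← he, hq00])
        show (pvRow0 pl).getD a.toNat 0 = pvS q (q.take 0 ++ [a])
        unfold pvRow0
        rw [getD_set_ne _ _ _ _ _ (fun he => hia he.symm), getD_replicate0, hrhs, if_neg hne]
    · show (0 : Nat) = pvS q ((q.take (0 + 1)).drop 1)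
      rw [zero_add, take_one_drop_one_nil, pvS_nil]
  | succ n ihn =>
    intro hn
    obtain ⟨hlen, hrlen, hrspec, hbrd⟩ := ihn (by omega)
    rw [range'_one_concat, List.foldl_append]
    set st := (List.range' 1 n).foldl (pvStepA pl) ([pvRow0 pl], 0) with hst
    simp only [List.foldl_cons, List.foldl_nil]
    have hcq : n + 1 < q.length := by omega
    have hclen : n + 1 < pl.length := by omega
    have hqc : q.getD (n + 1) ' ' = pl.getD (n + 1) ' ' := by rw [hq]; exact getD_dropLast (by omega)
    have hbrd_le : st.2 ≤ n := by
      have h1 := pvS_le_len q ((q.take (n + 1)).drop 1)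
      rw [List.length_drop, List.length_take] at h1
      omega
    have hext : ∀ a : Char, pvS q ((q.take (n + 1)).drop 1 ++ [a]) = pvS q (q.take st.2 ++ [a]) := by
      intro a
      rw [pvS_ext (by rw [← hbrd]; omega), ← hbrd]
    have hkey : ∀ a : Char, a.toNat < 128 →
        (st.1.getD st.2 []).getD a.toNat 0 = pvS q ((q.take (n + 1)).drop 1 ++ [a]) := by
      intro a ha
      rw [hrspec st.2 hbrd_le a ha, ← hext a]
    have hWsucc : (q.take (n + 1 + 1)).drop 1 = (q.take (n + 1)).drop 1 ++ [q.getD (n + 1) ' '] := by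
      rw [take_concat_getD hcq, List.drop_append_of_le_length (by rw [List.length_take]; omega)]
    have hpcascii : (pl.getD (n + 1) ' ').toNat < 128 :=
      hascii _ (by rw [List.getD_eq_getElem _ _ hclen]; exact List.getElem_mem _)
    refine ⟨?_, ?_, ?_, ?_⟩
    · show (st.1 ++ [(st.1.getD st.2 []).set (pl.getD (n + 1) ' ').toNat (n + 1 + 1)]).length = n + 1 + 1
      rw [List.length_append, hlen]
      rfl
    · intro t ht
      rcases Nat.lt_or_ge t (n + 1) with h | h
      · show ((st.1 ++ _).getD t []).length = 128
        rw [List.getD_append _ _ _ _ (by omega)]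
        exact hrlen t (by omega)
      · have htc : t = n + 1 := by omega
        subst htc
        show ((st.1 ++ [(st.1.getD st.2 []).set (pl.getD (n + 1) ' ').toNat (n + 1 + 1)]).getD (n + 1) []).length = 128
        rw [getD_concat_len _ _ _ _ (by omega), List.length_set]
        exact hrlen st.2 hbrd_le
    · intro t ht a ha
      rcases Nat.lt_or_ge t (n + 1) with h | h
      · show ((st.1 ++ _).getD t []).getD a.toNat 0 = pvS q (q.take t ++ [a])
        rw [List.getD_append _ _ _ _ (by omega)]
        exact hrspec t (by omega) a ha
      · have htc : t = n + 1 := by omega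
        subst htc
        show ((st.1 ++ [(st.1.getD st.2 []).set (pl.getD (n + 1) ' ').toNat (n + 1 + 1)]).getD (n + 1) []).getD a.toNat 0
          = pvS q (q.take (n + 1) ++ [a])
        rw [getD_concat_len _ _ _ _ (by omega)]
        by_cases hia : a.toNat = (pl.getD (n + 1) ' ').toNat
        · have ha' : a = pl.getD (n + 1) ' ' := char_eq_of_toNat hia
          rw [hia, getD_set_self _ _ _ _ (by rw [hrlen st.2 hbrd_le]; exact hpcascii)]
          rw [ha', ← hqc, ← take_concat_getD hcq, pvS_take (by omega)]
        · have hqa : q.getD (n + 1) ' ' ≠ a := by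
            intro he
            exact hia (by rw [← he, hqc])
          rw [getD_set_ne _ _ _ _ _ (fun he => hia he.symm), hkey a ha]
          exact (pvS_neq (by omega) hcq hqa).symm
    · show (st.1.getD st.2 []).getD (pl.getD (n + 1) ' ').toNat 0 = pvS q ((q.take (n + 1 + 1)).drop 1)
      rw [hkey _ hpcascii, hWsucc, hqc]

-- ===== B-side: the descent-loop result does not depend on surplus fuel =====
lemma descend_fuel (q : List Char) (fl : List Nat) (a : Char) (hle : ∀ t, fl.getD t 0 ≤ t) :
    ∀ j f1 f2, j ≤ f1 → j ≤ f2 → pvDescend q fl a f1 j = pvDescend q fl a f2 j := by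
  intro j
  induction j using Nat.strong_induction_on with
  | _ j ih =>
    intro f1 f2 h1 h2
    cases j with
    | zero =>
      cases f1 <;> cases f2 <;> simp [pvDescend]
    | succ n =>
      obtain ⟨g1, rfl⟩ : ∃ g, f1 = g + 1 := ⟨f1 - 1, by omega⟩
      obtain ⟨g2, rfl⟩ : ∃ g, f2 = g + 1 := ⟨f2 - 1, by omega⟩
      simp only [pvDescend, Nat.add_sub_cancel]
      by_cases hc : 0 < n + 1 ∧ q.getD (n + 1) ' ' ≠ a
      · rw [if_pos hc, if_pos hc]
        have hlt : fl.getD n 0 ≤ n := hle n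
        exact ih _ (by omega) _ _ (by omega) (by omega)
      · rw [if_neg hc, if_neg hc]

-- ===== B-side: _step computes the pvS transition =====
lemma pvStep_spec (q : List Char) (fl : List Nat) (a : Char) (hle : ∀ t, fl.getD t 0 ≤ t) :
    ∀ j, j < q.length → (∀ t, t < j → fl.getD t 0 = pvS q ((q.take (t + 1)).drop 1)) →
      pvStep q fl j a = pvS q (q.take j ++ [a]) := by
  intro j
  induction j using Nat.strong_induction_on with
  | _ j ih =>
    intro hj hspec
    by_cases hqa : q.getD j ' ' = a
    · have hd : pvDescend q fl a j j = j := by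
        cases j with
        | zero => rfl
        | succ n =>
          simp only [pvDescend]
          rw [if_neg (fun h => h.2 hqa)]
      simp only [pvStep, hd, if_pos hqa]
      rw [← hqa, ← take_concat_getD hj, pvS_take (by omega)]
    · cases j with
      | zero =>
        have hd : pvDescend q fl a 0 0 = 0 := rfl
        simp only [pvStep, hd, if_neg hqa]
        rw [List.take_zero, List.nil_append, pvS_single (by omega) a, if_neg hqa]
      | succ n =>
        have hps : pvStep q fl (n + 1) a = pvStep q fl (fl.getD n 0) a := by
          unfold pvStep
          have h1 : pvDescend q fl a (n + 1) (n + 1) = pvDescend q fl a n (fl.getD n 0) := by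
            simp only [pvDescend, Nat.add_sub_cancel]
            rw [if_pos ⟨Nat.succ_pos n, hqa⟩]
          have h2 : pvDescend q fl a n (fl.getD n 0) = pvDescend q fl a (fl.getD n 0) (fl.getD n 0) :=
            descend_fuel q fl a hle _ _ _ (hle n) le_rfl
          rw [h1, h2]
        have hj2 : fl.getD n 0 ≤ n := hle n
        rw [hps, ih _ (by omega) (by omega) (fun t ht => hspec t (by omega))]
        have hfl : fl.getD n 0 = pvS q ((q.take (n + 1)).drop 1) := hspec n (by omega)
        have e1 : pvS q (q.take (n + 1) ++ [a]) = pvS q ((q.take (n + 1)).drop 1 ++ [a]) :=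
          pvS_neq (by omega) hj hqa
        have e2 : pvS q ((q.take (n + 1)).drop 1 ++ [a])
            = pvS q (q.take (pvS q ((q.take (n + 1)).drop 1)) ++ [a]) :=
          pvS_ext (by rw [← hfl]; omega)
        rw [e1, e2, ← hfl]

-- ===== B-side invariant: the failure table holds the border lengths =====
lemma buildB_inv (q : List Char) (m : Nat) (hm : m = q.length) (hm1 : 1 ≤ m) :
    ∀ n, n ≤ m - 1 →
      (((List.range' 1 n).foldl (pvBuildStep q) (List.replicate m 0)).length = m) ∧
      (∀ t, ((List.range' 1 n).foldl (pvBuildStep q) (List.replicate m 0)).getD t 0 ≤ t) ∧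
      (∀ t, t ≤ n → ((List.range' 1 n).foldl (pvBuildStep q) (List.replicate m 0)).getD t 0
          = pvS q ((q.take (t + 1)).drop 1)) := by
  intro n
  induction n with
  | zero =>
    intro _
    simp only [List.range'_zero, List.foldl_nil]
    refine ⟨by simp, fun t => by rw [getD_replicate0]; omega, fun t ht => ?_⟩
    interval_cases t
    rw [getD_replicate0, zero_add, take_one_drop_one_nil, pvS_nil]
  | succ n ihn =>
    intro hn
    obtain ⟨hlen, hle2, hspec⟩ := ihn (by omega)
    rw [range'_one_concat, List.foldl_append]
    set fl := (List.range' 1 n).foldl (pvBuildStep q) (List.replicate m 0) with hfldef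
    simp only [List.foldl_cons, List.foldl_nil]
    unfold pvBuildStep
    have hj0 : fl.getD (n + 1 - 1) 0 = pvS q ((q.take (n + 1)).drop 1) := by
      simpa using hspec n le_rfl
    have hj0le : fl.getD (n + 1 - 1) 0 ≤ n := by simpa using hle2 (n + 1 - 1)
    have hq1 : fl.getD (n + 1 - 1) 0 < q.length := by omega
    have hstep := pvStep_spec q fl (q.getD (n + 1) ' ') hle2 (fl.getD (n + 1 - 1) 0) hq1
      (fun t ht => hspec t (by omega))
    have hWext : pvS q ((q.take (n + 1)).drop 1 ++ [q.getD (n + 1) ' '])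
        = pvS q (q.take (fl.getD (n + 1 - 1) 0) ++ [q.getD (n + 1) ' ']) := by
      rw [pvS_ext (by rw [← hj0]; omega), ← hj0]
    have hWsucc : (q.take (n + 1 + 1)).drop 1
        = (q.take (n + 1)).drop 1 ++ [q.getD (n + 1) ' '] := by
      rw [take_concat_getD (by omega), List.drop_append_of_le_length (by rw [List.length_take]; omega)]
    refine ⟨by rw [List.length_set]; exact hlen, ?_, ?_⟩
    · intro t
      by_cases htc : t = n + 1
      · subst htc
        rw [getD_set_self _ _ _ _ (by rw [hlen]; omega), hstep, ← hWext, ← hWsucc]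
        have h1 := pvS_le_len q ((q.take (n + 1 + 1)).drop 1)
        rw [List.length_drop, List.length_take] at h1
        omega
      · rw [getD_set_ne _ _ _ _ _ (fun he => htc he.symm)]
        exact hle2 t
    · intro t ht
      by_cases htc : t = n + 1
      · subst htc
        rw [getD_set_self _ _ _ _ (by rw [hlen]; omega), hstep, ← hWext, hWsucc]
      · rw [getD_set_ne _ _ _ _ _ (fun he => htc he.symm)]
        exact hspec t (by omega)

-- ===== the two scans run in lockstep =====
lemma scan_eq (q : List Char) (fsm : List (List Nat)) (fl : List Nat) (m : Nat) (hm : m = q.length)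
    (hrow : ∀ t, t < m → ∀ a : Char, a.toNat < 128 →
      (fsm.getD t []).getD a.toNat 0 = pvS q (q.take t ++ [a]))
    (hle : ∀ t, fl.getD t 0 ≤ t)
    (hfl : ∀ t, t < m → fl.getD t 0 = pvS q ((q.take (t + 1)).drop 1)) :
    ∀ rest : List Char, (∀ ch ∈ rest, ch.toNat < 128) → ∀ i l p s, s ≤ l → l ≤ m →
      pvScanA fsm m rest i l p s = pvScanB q fl m rest i l p s := by
  intro rest
  induction rest with
  | nil => intro _ i l p s _ _; rfl
  | cons a rest ih =>
    intro hascii i l p s hsl hlm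
    by_cases hl : l < m
    · have hs : s < m := lt_of_le_of_lt hsl hl
      have hcur : (fsm.getD s []).getD a.toNat 0 = pvS q (q.take s ++ [a]) :=
        hrow s hs a (hascii a (List.mem_cons_self ..))
      have hstep : pvStep q fl s a = pvS q (q.take s ++ [a]) :=
        pvStep_spec q fl a hle s (by omega) (fun t ht => hfl t (by omega))
      simp only [pvScanA, pvScanB, if_pos hl, hcur, hstep]
      have hv : pvS q (q.take s ++ [a]) ≤ m := by rw [hm]; exact pvS_le q _
      by_cases hlv : l < pvS q (q.take s ++ [a])
      · rw [if_pos hlv, if_pos hlv]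
        exact ih (fun ch hc => hascii ch (List.mem_cons_of_mem _ hc)) _ _ _ _ le_rfl hv
      · rw [if_neg hlv, if_neg hlv]
        exact ih (fun ch hc => hascii ch (List.mem_cons_of_mem _ hc)) _ _ _ _ (by omega) hlm
    · simp only [pvScanA, pvScanB, if_neg hl]

lemma scanA_m0 (fsm : List (List Nat)) (rest : List Char) (i l p s : Nat) :
    pvScanA fsm 0 rest i l p s = (p, l) := by
  cases rest <;> simp [pvScanA]

lemma scanB_m0 (q : List Char) (fl : List Nat) (rest : List Char) (i l p s : Nat) :
    pvScanB q fl 0 rest i l p s = (p, l) := by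
  cases rest <;> simp [pvScanB]

-- ===== VERDICT =====
theorem max_prefix_match_spec : Claim_equal_max_prefix_match := by
  unfold Claim_equal_max_prefix_match
  intro txt pat hdom hpre
  unfold Spec_max_prefix_match
  have hdom' : pvDomStr txt = true ∧ pvDomStr pat = true := by
    unfold Dom_max_prefix_match at hdom
    rwa [Bool.and_eq_true] at hdom
  have htxt := ascii_of_dom hdom'.1
  have hpat := ascii_of_dom hdom'.2
  simp only [max_prefix_match, max_prefix_match_alt]
  set pl := pat.toList with hpldef
  set q := pl.dropLast with hqdef
  have hql : q.length = pl.length - 1 := by rw [hqdef, List.length_dropLast]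
  rcases Nat.eq_zero_or_pos (pl.length - 1) with hm0 | hm1
  · rw [hql, hm0, scanA_m0, scanB_m0]
  · obtain ⟨hAlen, hArlen, hArspec, hAbrd⟩ :=
      buildA_inv pl q (pl.length - 1) hqdef hql.symm hm1 hpat (pl.length - 1 - 1) le_rfl
    obtain ⟨hBlen, hBle, hBspec⟩ :=
      buildB_inv q (pl.length - 1) hql.symm hm1 (pl.length - 1 - 1) le_rfl
    rw [hql]
    rw [scan_eq q _ _ (pl.length - 1) hql.symm
      (fun t ht a ha => hArspec t (by omega) a ha)
      hBle
      (fun t ht => hBspec t (by omega))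
      txt.toList htxt 0 0 0 0 le_rfl (by omega)]
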